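-- pv_equiv track=rewrite | github.com/CausalAgentProtocol/cap-example | example_cap_server/toy_graph.py | markov_blanket
-- ===== SOURCE A (Python) =====
-- from dataclasses import dataclass
--
-- @dataclass(frozen=True)
-- class Edge:
--     source: str
--     target: str
--     weight: float
--
-- EDGES = (
--     Edge("marketing_spend", "demand", 0.6),
--     Edge("product_quality", "demand", 1.2),
--     Edge("product_quality", "retention", 0.05),
--     Edge("demand", "revenue", 2.0),
--     Edge("retention", "revenue", 12.0),
-- )
--
-- def parent_edges(node_id: str) -> list[Edge]:
--     return [edge for edge in EDGES if edge.target == node_id]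
--
-- def child_edges(node_id: str) -> list[Edge]:
--     return [edge for edge in EDGES if edge.source == node_id]
--
-- def neighbors(node_id: str, scope: str) -> list[str]:
--     if scope == "parents":
--         return [edge.source for edge in parent_edges(node_id)]
--     if scope == "children":
--         return [edge.target for edge in child_edges(node_id)]
--     raise ValueError(f"Unsupported scope: {scope}")
--
-- def markov_blanket(node_id: str) -> list[str]:
--     parents = set(neighbors(node_id, "parents"))
--     children = set(neighbors(node_id, "children"))
--     spouses: set[str] = set()
--     for child in children:
--         spouses.update(neighbors(child, "parents"))
--     spouses.discard(node_id)
--     blanket = parents | children | spouses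
--     return sorted(blanket)
-- ===== SOURCE B (Python) =====
-- from dataclasses import dataclass
--
-- @dataclass(frozen=True)
-- class Edge:
--     source: str
--     target: str
--     weight: float
--
-- EDGES = (
--     Edge("marketing_spend", "demand", 0.6),
--     Edge("product_quality", "demand", 1.2),
--     Edge("product_quality", "retention", 0.05),
--     Edge("demand", "revenue", 2.0),
--     Edge("retention", "revenue", 12.0),
-- )
--
-- # adjacency precomputed once in a single pass over EDGES
-- PARENTS_OF: dict[str, set[str]] = {}
-- CHILDREN_OF: dict[str, set[str]] = {}
-- for _e in EDGES:
--     PARENTS_OF.setdefault(_e.target, set()).add(_e.source)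
--     CHILDREN_OF.setdefault(_e.source, set()).add(_e.target)
--
-- def markov_blanket(node_id: str) -> list[str]:
--     parents = PARENTS_OF.get(node_id, set())
--     children = CHILDREN_OF.get(node_id, set())
--     spouses = set().union(*(PARENTS_OF.get(c, set()) for c in children)) - {node_id}
--     return sorted(parents | children | spouses)
-- ===== Notes on version B (the rewrite author's own statement) =====
-- stated objective: simpler
-- what changed: Replaces the per-call scans of EDGES (filter helpers parent_edges/child_edges/neighbors) with two adjacency dicts built once at module load; markov_blanket becomes three lookups, one union over the children's parent sets, and a sort.
import Mathlib
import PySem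

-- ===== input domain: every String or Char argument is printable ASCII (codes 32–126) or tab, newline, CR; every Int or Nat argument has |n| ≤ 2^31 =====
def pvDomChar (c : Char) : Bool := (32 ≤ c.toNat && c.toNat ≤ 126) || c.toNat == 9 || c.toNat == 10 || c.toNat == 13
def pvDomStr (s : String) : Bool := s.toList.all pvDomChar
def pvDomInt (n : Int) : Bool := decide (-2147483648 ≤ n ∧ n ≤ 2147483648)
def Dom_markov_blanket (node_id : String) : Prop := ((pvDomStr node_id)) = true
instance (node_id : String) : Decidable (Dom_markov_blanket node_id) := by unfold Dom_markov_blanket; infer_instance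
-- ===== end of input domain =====

-- B replaces A's per-call edge scans with adjacency dicts built once; equal return value on all inputs.
-- Edge weights are never read by markov_blanket, so edges are ported as (source, target) pairs.
-- sorted() over strings is ported with the code-point key (·.toList): Python str < IS Lean < on s.toList (PYSEM str COMPARISON), same order.

-- ===== PORT A =====
def pvEDGES : List (String × String) :=
  [("marketing_spend", "demand"), ("product_quality", "demand"),
   ("product_quality", "retention"), ("demand", "revenue"), ("retention", "revenue")]

def parent_edges (node_id : String) : List (String × String) :=
  pvEDGES.filter (fun e => e.2 == node_id)

def child_edges (node_id : String) : List (String × String) :=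
  pvEDGES.filter (fun e => e.1 == node_id)

-- the final branch raises ValueError in Python; it is unreachable from markov_blanket, ported as []
def neighbors (node_id : String) (scope : String) : List String :=
  if scope == "parents" then (parent_edges node_id).map (·.1)
  else if scope == "children" then (child_edges node_id).map (·.2)
  else []

def markov_blanket (node_id : String) : List String :=
  let parents := PySem.Set.ofList (neighbors node_id "parents")
  let children := PySem.Set.ofList (neighbors node_id "children")
  let spouses := children.foldl (fun s c => PySem.Set.update s (neighbors c "parents")) PySem.Set.empty
  let spouses := PySem.Set.discard spouses node_id
  let blanket := PySem.Set.union (PySem.Set.union parents children) spouses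
  PySem.List.sorted blanket (fun x => x.toList) false

-- ===== PORT B =====
def pvPARENTS_OF : PySem.Dict String (PySem.Set String) :=
  pvEDGES.foldl (fun d e => d.insert e.2 (PySem.Set.add (d.getD e.2 PySem.Set.empty) e.1)) PySem.Dict.empty

def pvCHILDREN_OF : PySem.Dict String (PySem.Set String) :=
  pvEDGES.foldl (fun d e => d.insert e.1 (PySem.Set.add (d.getD e.1 PySem.Set.empty) e.2)) PySem.Dict.empty

def markov_blanket_alt (node_id : String) : List String :=
  let parents := pvPARENTS_OF.getD node_id PySem.Set.empty
  let children := pvCHILDREN_OF.getD node_id PySem.Set.empty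
  let spouses := PySem.Set.diff
    (children.foldl (fun s c => PySem.Set.union s (pvPARENTS_OF.getD c PySem.Set.empty)) PySem.Set.empty)
    [node_id]
  PySem.List.sorted (PySem.Set.union (PySem.Set.union parents children) spouses) (fun x => x.toList) false

-- ===== PRECONDITION & SPEC =====
def Spec_markov_blanket (node_id : String) (out : List String) : Prop := out = markov_blanket_alt node_id
instance (node_id : String) (out : List String) : Decidable (Spec_markov_blanket node_id out) := by unfold Spec_markov_blanket; infer_instance

-- ===== CLAIM (what is proved, stated in full; the proofs are below) =====
def Claim_equal_markov_blanket : Prop := ∀ (node_id : String), Dom_markov_blanket node_id → Spec_markov_blanket node_id (markov_blanket node_id)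

-- ===== LEMMAS AND PROOFS =====

-- the precomputed adjacency dicts, evaluated to their literal form (proof-only)
theorem pvPARENTS_OF_eq : pvPARENTS_OF = PySem.Dict.mk
    [("demand", ["marketing_spend", "product_quality"]), ("retention", ["product_quality"]),
     ("revenue", ["demand", "retention"])] := by decide

theorem pvCHILDREN_OF_eq : pvCHILDREN_OF = PySem.Dict.mk
    [("marketing_spend", ["demand"]), ("product_quality", ["demand", "retention"]),
     ("demand", ["revenue"]), ("retention", ["revenue"])] := by decide

-- ===== VERDICT (by name: the statement is the Claim_ definition above) =====
theorem markov_blanket_spec : Claim_equal_markov_blanket := by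
  intro node_id _
  unfold Spec_markov_blanket
  by_cases h1 : node_id = "marketing_spend"; · subst h1; decide
  by_cases h2 : node_id = "product_quality"; · subst h2; decide
  by_cases h3 : node_id = "demand"; · subst h3; decide
  by_cases h4 : node_id = "retention"; · subst h4; decide
  by_cases h5 : node_id = "revenue"; · subst h5; decide
  rw [markov_blanket, markov_blanket_alt, pvPARENTS_OF_eq, pvCHILDREN_OF_eq]
  simp [neighbors, parent_edges, child_edges, pvEDGES, PySem.Dict.getD, PySem.Set.ofList, PySem.Set.empty, PySem.Set.union,
        PySem.Set.discard, PySem.Set.diff, PySem.List.sorted, PySem.Dict.get?, PySem.Set.update,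
        Ne.symm h1, Ne.symm h2, Ne.symm h3, Ne.symm h4, Ne.symm h5]
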